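-- pv_equiv track=rewrite | github.com/GreatLearning-NLP-Capstone-Group-9/Automatic-Ticket-Classification | utils/link_handler.py | get_tok_indexlist
-- ===== SOURCE A (Python) =====
-- def get_tok_indexlist(token_list):
--     '''
--     Given a list of text tokens, it returns a list with the the elements
--     representing the starting point of a each token considering the spaces
--     between the tokens
--     eg: Input = ["ab","cd","ef"]
--         Output = [0,3,6]
--     '''
--     tok_index = []
--     for index, _ in enumerate(token_list):
--         if index == 0:
--             tok_index.extend([0])
--         else:
--             # +1 to consider space
--             tok_index.extend([tok_index[-1]+len(token_list[index-1])+1])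
--     return tok_index
-- ===== SOURCE B (Python) =====
-- def get_tok_indexlist(token_list):
--     '''
--     Given a list of text tokens, return the starting offset of each token,
--     tokens separated by single spaces. eg ["ab","cd","ef"] -> [0,3,6].
--     Closed form per index: token i starts after the i preceding separators
--     plus the total length of the preceding tokens.
--     '''
--     return [i + len("".join(token_list[:i])) for i in range(len(token_list))]
-- ===== Notes on version B (the rewrite author's own statement) =====
-- stated objective: alternative
-- what changed: Replaces A's stateful single pass (special case for index 0, reading back its own last output tok_index[-1]) by a stateless per-index closed form: offset i = i + len(''.join(token_list[:i])), each element computed independently from the input prefix.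
import Mathlib
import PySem

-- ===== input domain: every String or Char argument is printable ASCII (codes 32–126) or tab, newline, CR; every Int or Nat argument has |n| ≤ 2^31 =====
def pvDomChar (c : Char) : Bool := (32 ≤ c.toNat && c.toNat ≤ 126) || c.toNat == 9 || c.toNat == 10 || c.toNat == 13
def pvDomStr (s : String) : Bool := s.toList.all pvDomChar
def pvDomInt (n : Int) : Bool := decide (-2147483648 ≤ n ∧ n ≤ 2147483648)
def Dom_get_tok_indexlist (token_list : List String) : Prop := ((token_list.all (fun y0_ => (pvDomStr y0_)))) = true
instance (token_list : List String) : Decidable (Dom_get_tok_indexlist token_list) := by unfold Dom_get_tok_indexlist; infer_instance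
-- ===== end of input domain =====

-- B replaces A's stateful pass (index-0 special case, reading back tok_index[-1]) by a stateless per-index closed form i + len("".join(prefix)) (alternative decomposition, same results).

-- ===== PORT A =====
-- the .getD fallbacks never fire: the else branch runs only for index ≥ 1, where
-- tok_index is nonempty and token_list[index-1] is in range (exactly as in Python).
def get_tok_indexlist (token_list : List String) : List Int :=
  (PySem.List.enumerate token_list 0).foldl
    (fun tok_index p =>
      if p.1 == 0 then tok_index ++ [0]
      else tok_index ++
        [((PySem.List.pyGet? tok_index (-1)).getD 0)
          + PySem.Str.len ((PySem.List.pyGet? token_list (p.1 - 1)).getD "") + 1])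
    []

-- ===== PORT B =====
-- Source B's comprehension: [i + len("".join(token_list[:i])) for i in range(len(token_list))]
def get_tok_indexlist_alt (token_list : List String) : List Int :=
  (PySem.List.pyRange 0 token_list.length 1).map
    (fun i => i + PySem.Str.len (PySem.Str.join "" (PySem.List.slice token_list none (some i))))

-- ===== PRECONDITION & SPEC =====
def Spec_get_tok_indexlist (token_list : List String) (out : List Int) : Prop := out = get_tok_indexlist_alt token_list
instance (token_list : List String) (out : List Int) : Decidable (Spec_get_tok_indexlist token_list out) := by unfold Spec_get_tok_indexlist; infer_instance

-- ===== CLAIM (what is proved, stated in full; the proofs are below) =====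
def Claim_equal_get_tok_indexlist : Prop := ∀ (token_list : List String), Dom_get_tok_indexlist token_list → Spec_get_tok_indexlist token_list (get_tok_indexlist token_list)

-- ===== LEMMAS AND PROOFS =====

-- canonical intermediate form: 0 followed by the running sums of len+1 over the tokens before the last
def pvAccum : List String → Int → List Int
  | [], _ => []
  | tok :: rest, total =>
      (total + PySem.Str.len tok + 1) :: pvAccum rest (total + PySem.Str.len tok + 1)

def pvCanon (token_list : List String) : List Int :=
  if token_list = [] then [] else 0 :: pvAccum token_list.dropLast 0

def pvLenSum (xs : List String) : Int := (xs.map (fun t => PySem.Str.len t + 1)).sum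

def pvLenSum0 (xs : List String) : Int := (xs.map PySem.Str.len).sum

theorem pvAccum_append (xs : List String) (y : String) (s : Int) :
    pvAccum (xs ++ [y]) s = pvAccum xs s ++ [s + pvLenSum xs + PySem.Str.len y + 1] := by
  induction xs generalizing s with
  | nil => simp [pvAccum, pvLenSum]
  | cons t ts ih =>
      simp only [List.cons_append, pvAccum, ih, pvLenSum, List.map_cons, List.sum_cons]
      congr 3
      ring

theorem pvAccum_getLast (xs : List String) (s : Int) :
    (s :: pvAccum xs s).getLast? = some (s + pvLenSum xs) := by
  induction xs generalizing s with
  | nil => simp [pvAccum, pvLenSum]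
  | cons t ts ih =>
      simp only [pvAccum, pvLenSum, List.map_cons, List.sum_cons]
      rw [List.getLast?_cons_cons, ih]
      simp [pvLenSum]; ring

theorem a_eq_canon (tl : List String) : get_tok_indexlist tl = pvCanon tl := by
  induction tl using List.reverseRecOn with
  | nil => rfl
  | append_singleton tl x ih =>
    have hstep : get_tok_indexlist (tl ++ [x]) =
        (if ((tl.length : Int)) == 0 then get_tok_indexlist tl ++ [0]
         else get_tok_indexlist tl ++
           [((PySem.List.pyGet? (get_tok_indexlist tl) (-1)).getD 0)
             + PySem.Str.len ((PySem.List.pyGet? (tl ++ [x]) ((tl.length : Int) - 1)).getD "") + 1]) := by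
      unfold get_tok_indexlist
      rw [PySem.List.enumerate_append, List.foldl_append]
      rw [PySem.List.foldl_congr_mem (PySem.List.enumerate tl 0) _ (fun tok_index (p : Int × String) =>
        if p.1 == 0 then tok_index ++ [0]
        else tok_index ++ [((PySem.List.pyGet? tok_index (-1)).getD 0)
          + PySem.Str.len ((PySem.List.pyGet? tl (p.1 - 1)).getD "") + 1]) _ (by
        intro acc p hp
        rcases (PySem.List.mem_enumerate_iff _ _ _).mp hp with ⟨k, hk, rfl⟩
        by_cases hk0 : k = 0
        · subst hk0; simp
        · have h2 : k - 1 < tl.length := by omega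
          have h1 : ((k : Int)) - 1 = ((k-1 : Nat) : Int) := by omega
          simp only [zero_add, h1, PySem.List.pyGet?_natCast, List.getElem?_append_left h2])]
      simp only [PySem.List.enumerate_cons, PySem.List.enumerate_nil, List.foldl_cons,
        List.foldl_nil, zero_add]
    rw [hstep]
    by_cases htl : tl = []
    · subst htl
      simp [get_tok_indexlist, pvCanon, PySem.List.enumerate_nil, pvAccum]
    · have hn : 0 < tl.length := List.length_pos_iff.mpr htl
      have hcond : (((tl.length : Int)) == 0) = false := by simp; omega
      rw [hcond]
      simp only [Bool.false_eq_true, if_false, ih]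
      have hBtl : pvCanon tl = 0 :: pvAccum tl.dropLast 0 := by
        rw [pvCanon, if_neg htl]
      have hlast : (PySem.List.pyGet? (pvCanon tl) (-1)).getD 0
          = pvLenSum tl.dropLast := by
        rw [hBtl, PySem.List.pyGet?_neg_one, pvAccum_getLast]
        simp
      have h1 : ((tl.length : Int)) - 1 = ((tl.length - 1 : Nat) : Int) := by omega
      have h2 : tl.length - 1 < tl.length := by omega
      have hget : (PySem.List.pyGet? (tl ++ [x]) ((tl.length : Int) - 1)).getD ""
          = tl.getLast htl := by
        rw [h1, PySem.List.pyGet?_natCast, List.getElem?_append_left h2]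
        simp [List.getLast_eq_getElem, List.getElem?_eq_getElem h2]
      rw [hlast, hget, hBtl]
      have hRHS : pvCanon (tl ++ [x]) = 0 :: pvAccum tl 0 := by
        rw [pvCanon, if_neg (by simp)]
        simp
      rw [hRHS]
      conv_rhs => rw [← List.dropLast_append_getLast htl, pvAccum_append]
      simp [add_comm]

theorem pvLenSum_eq (xs : List String) : pvLenSum xs = pvLenSum0 xs + xs.length := by
  induction xs with
  | nil => simp [pvLenSum, pvLenSum0]
  | cons t ts ih =>
      simp only [pvLenSum, pvLenSum0, List.map_cons, List.sum_cons, List.length_cons] at ih ⊢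
      push_cast
      omega

theorem len_join_empty (ps : List String) :
    PySem.Str.len (PySem.Str.join "" ps) = pvLenSum0 ps := by
  induction ps with
  | nil =>
      simp [PySem.Str.len_eq, PySem.Str.toList_join, PySem.Chars.join_nil, pvLenSum0]
  | cons p ps ih =>
      cases ps with
      | nil =>
          simp [PySem.Str.len_eq, PySem.Str.toList_join, PySem.Chars.join_singleton, pvLenSum0]
      | cons q qs =>
          have he : ("" : String).toList = [] := rfl
          have h := PySem.Chars.join_cons_cons ([]) p.toList q.toList (qs.map String.toList)
          simp only [PySem.Str.len_eq, PySem.Str.toList_join, List.map_cons, he] at ih ⊢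
          rw [h]
          simp only [List.length_append, List.append_nil, pvLenSum0, List.map_cons,
            List.sum_cons, PySem.Str.len_eq] at ih ⊢
          push_cast at ih ⊢
          omega

theorem b_eq_canon (tl : List String) : get_tok_indexlist_alt tl = pvCanon tl := by
  induction tl using List.reverseRecOn with
  | nil => rfl
  | append_singleton tl x ih =>
    unfold get_tok_indexlist_alt at ih ⊢
    have hlen : ((tl ++ [x]).length : Int) = (tl.length : Int) + 1 := by simp
    rw [hlen, PySem.List.pyRange_one_succ_right (by positivity)]
    rw [List.map_append]
    have hmap : (PySem.List.pyRange 0 (tl.length) 1).map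
        (fun i => i + PySem.Str.len (PySem.Str.join "" (PySem.List.slice (tl ++ [x]) none (some i))))
        = (PySem.List.pyRange 0 (tl.length) 1).map
        (fun i => i + PySem.Str.len (PySem.Str.join "" (PySem.List.slice tl none (some i)))) := by
      apply List.map_congr_left
      intro i hi
      rcases (PySem.List.mem_pyRange_one).mp hi with ⟨h0, h1⟩
      rw [PySem.List.slice_to _ h0, PySem.List.slice_to _ h0,
        List.take_append_of_le_length (by omega)]
    rw [hmap, ih]
    -- last element
    have hlast : ((tl.length : Int) + PySem.Str.len (PySem.Str.join "" (PySem.List.slice (tl ++ [x]) none (some (tl.length : Int)))))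
        = (tl.length : Int) + pvLenSum0 tl := by
      rw [PySem.List.slice_to _ (by positivity), len_join_empty]
      simp
    simp only [List.map_cons, List.map_nil]
    by_cases htl : tl = []
    · subst htl
      simp only [List.length_nil, Nat.cast_zero, List.nil_append] at hlast ⊢
      rw [hlast]
      simp [pvCanon, pvAccum, pvLenSum0]
    · rw [hlast]
      have hC1 : pvCanon tl = 0 :: pvAccum tl.dropLast 0 := by rw [pvCanon, if_neg htl]
      have hC2 : pvCanon (tl ++ [x]) = 0 :: pvAccum tl 0 := by
        rw [pvCanon, if_neg (by simp)]; simp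
      rw [hC1, hC2]
      conv_rhs => rw [← List.dropLast_append_getLast htl, pvAccum_append]
      have hsum : (0 : Int) + pvLenSum tl.dropLast + PySem.Str.len (tl.getLast htl) + 1
          = (tl.length : Int) + pvLenSum0 tl := by
        have hn : 0 < tl.length := List.length_pos_iff.mpr htl
        have hd : tl.dropLast.length = tl.length - 1 := by simp
        have h1 : pvLenSum tl.dropLast = pvLenSum0 tl.dropLast + tl.dropLast.length :=
          pvLenSum_eq tl.dropLast
        have h2 : pvLenSum0 tl = pvLenSum0 tl.dropLast + PySem.Str.len (tl.getLast htl) := by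
          conv_lhs => rw [← List.dropLast_append_getLast htl]
          simp [pvLenSum0]
        rw [h1, h2, hd]
        push_cast [hn]
        ring
      rw [hsum]
      simp

-- ===== VERDICT (by name: the statement is the Claim_ definition above) =====
theorem get_tok_indexlist_spec : Claim_equal_get_tok_indexlist := by
  intro tl _
  unfold Spec_get_tok_indexlist
  rw [a_eq_canon, b_eq_canon]
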